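-- pv_equiv track=rewrite | github.com/rddtz/g5kstat | g5kstat.py | parse_cores
-- ===== SOURCE A (Python) =====
-- def parse_cores(resources : list[str], textmax : int) -> str:
--     """Get a list of resouces and return a string of type hosts and cores being used
--
--     Parameters
--     ----------
--     resources : list[str]
--         Names of the resourcecs being used, G5K sends the info as HOST/CORE
--     textmax : int
--         Maximum number of caracterd that can be used
--
--     Returns
--     -------
--     str
--         String like 'host[cores], host[cores]' with info about hosts and cores.
--
--     Notes
--     -----
--     If the resources list pass the textmax size, the rest of the string will be replaced with '...':
--     'host[cores], host[cores]' -> 'host[cores], hos...'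
--     """
--
--     hosts = sorted([(x.split(".")[0], x.split("/")[1]) for x in resources])
--
--     hosts_dict = {}
--
--     for i in hosts:
--         try:
--             hosts_dict[i[0]].append(i[1])
--         except KeyError:
--             hosts_dict[i[0]] = [i[1]]
--
--     ret = []
--     for k, v in hosts_dict.items():
--         # Create a list of cores like 0-10 if contiguous or 0,3,5 if not
--
--         cores = sorted(list(map(int, v)))
--
--         start = cores[0]
--         final = -1
--
--         past = start
--
--         final_string = ""
--
--         for i in cores[1:]: # check continuity
--             if i != past + 1:
--                 final = past
--                 if final == start:
--                     final_string += str(start) + ","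
--                 else:
--                     final_string += str(start) + "-" + str(final) + ","
--
--                 start = i
--             past = i
--
--         final = cores[-1]
--         if final == start:
--             final_string += str(start) + ","
--         else:
--             final_string += str(start) + "-" + str(final) + ","
--
--         final_string = f"{k}[{final_string[:len(final_string)-1]}]"
--         ret.append(final_string)
--
--     ret = ", ".join(ret)
--     if len(ret) > textmax:
--         ret = ret[:textmax - 3] + "..."
--
--     return ret
-- ===== SOURCE B (Python) =====
-- def parse_cores(resources: list[str], textmax: int) -> str:
--     """Single global pass: sort (host, int(core)) pairs once and stream through
--     them with host-change and run-break detection, emitting string tokens into a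
--     flat buffer; no per-host dict, no per-host sub-sort, no trailing-comma strip."""
--     items = sorted((x.split(".")[0], int(x.split("/")[1])) for x in resources)
--
--     buf = []
--     cur_host = None
--     run_start = prev = 0
--
--     def close_run():
--         buf.append(str(run_start) if prev == run_start else f"{run_start}-{prev}")
--
--     for host, core in items:
--         if host != cur_host:
--             if cur_host is not None:
--                 close_run()
--                 buf.append("], ")
--             buf.append(f"{host}[")
--             run_start = core
--         elif core != prev + 1:
--             close_run()
--             buf.append(",")
--             run_start = core
--         prev = core
--         cur_host = host
--
--     if cur_host is not None:
--         close_run()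
--         buf.append("]")
--
--     ret = "".join(buf)
--     if len(ret) > textmax:
--         ret = ret[:textmax - 3] + "..."
--     return ret
-- ===== Notes on version B (the rewrite author's own statement) =====
-- stated objective: alternative
-- what changed: A groups resources host-by-host with a dict, re-sorts each host's cores as ints and runs a per-host state-machine loop that appends 'fmt,' fragments and strips the trailing comma; B does one global sort of (host, int(core)) pairs and a single streaming pass over all pairs that detects host changes and run breaks, emitting string tokens into one flat buffer that is joined once (no dict, no per-host sub-sort, no comma strip).
import Mathlib
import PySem

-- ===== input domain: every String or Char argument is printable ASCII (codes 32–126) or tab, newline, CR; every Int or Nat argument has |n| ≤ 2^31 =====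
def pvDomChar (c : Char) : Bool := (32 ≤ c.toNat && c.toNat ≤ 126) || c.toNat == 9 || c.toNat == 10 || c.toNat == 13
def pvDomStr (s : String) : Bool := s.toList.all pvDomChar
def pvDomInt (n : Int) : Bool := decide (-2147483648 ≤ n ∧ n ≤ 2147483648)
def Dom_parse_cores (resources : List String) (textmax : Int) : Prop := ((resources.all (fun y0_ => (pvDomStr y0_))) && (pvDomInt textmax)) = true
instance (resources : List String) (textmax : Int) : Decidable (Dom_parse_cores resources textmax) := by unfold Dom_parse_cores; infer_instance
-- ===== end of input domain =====

-- B replaces A's dict grouping + per-host int re-sort + per-host state-machine loop (with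
-- trailing-comma strip) by ONE global sort of (host, int(core)) pairs and a single streaming
-- pass over all pairs, emitting tokens into one flat buffer; objective: alternative.

-- ===== PORT A =====
def parse_cores (resources : List String) (textmax : Int) : String :=
  let hosts := PySem.List.sorted2 (resources.map (fun x =>
      (((PySem.Str.split? x ".").getD []).getD 0 "",
       ((PySem.Str.split? x "/").getD []).getD 1 "")))
      (fun i => i.1) (fun i => i.2) false
  let hosts_dict := hosts.foldl (fun d i => d.modify i.1 [] (fun l => l ++ [i.2]))
      (PySem.Dict.empty : PySem.Dict String (List String))
  let ret := hosts_dict.items.foldl (fun ret kv =>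
      let cores := PySem.List.sorted (kv.2.map (fun s => (PySem.Int.ofStr? s).getD 0)) (fun x => x) false
      let start := PySem.List.pyGetD cores 0 0
      let st := (PySem.List.slice cores (some 1) none).foldl
          (fun (sp : Int × Int × String) i =>
            if i ≠ sp.2.1 + 1 then
              (i, i,
                if sp.2.1 = sp.1 then sp.2.2 ++ (PySem.Int.toStr sp.1 ++ ",")
                else sp.2.2 ++ (PySem.Int.toStr sp.1 ++ "-" ++ PySem.Int.toStr sp.2.1 ++ ","))
            else (sp.1, i, sp.2.2))
          (start, start, "")
      let fin := PySem.List.pyGetD cores (-1) 0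
      let final_string :=
        if fin = st.1 then st.2.2 ++ (PySem.Int.toStr st.1 ++ ",")
        else st.2.2 ++ (PySem.Int.toStr st.1 ++ "-" ++ PySem.Int.toStr fin ++ ",")
      let final_string := kv.1 ++ "[" ++
        PySem.Str.slice final_string none (some (PySem.Str.len final_string - 1)) ++ "]"
      ret ++ [final_string]) ([] : List String)
  let ret := PySem.Str.join ", " ret
  if PySem.Str.len ret > textmax then PySem.Str.slice ret none (some (textmax - 3)) ++ "..." else ret

-- ===== PORT B =====
-- close_run(): str(run_start) if prev == run_start else f"{run_start}-{prev}"
def pvClose (run_start prev : Int) : String :=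
  if prev = run_start then PySem.Int.toStr run_start
  else PySem.Int.toStr run_start ++ "-" ++ PySem.Int.toStr prev

-- one iteration of B's single for-loop; state = (buf, cur_host, run_start, prev)
def pvStep (s : List String × Option String × Int × Int) (hc : String × Int) :
    List String × Option String × Int × Int :=
  if some hc.1 ≠ s.2.1 then
    ((match s.2.1 with
      | none => s.1
      | some _ => s.1 ++ [pvClose s.2.2.1 s.2.2.2, "], "]) ++ [hc.1 ++ "["],
     some hc.1, hc.2, hc.2)
  else if hc.2 ≠ s.2.2.2 + 1 then
    (s.1 ++ [pvClose s.2.2.1 s.2.2.2, ","], some hc.1, hc.2, hc.2)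
  else (s.1, some hc.1, s.2.2.1, hc.2)

-- the 'if cur_host is not None: close_run(); buf.append("]")' epilogue
def pvFinish (s : List String × Option String × Int × Int) : List String :=
  match s.2.1 with
  | none => s.1
  | some _ => s.1 ++ [pvClose s.2.2.1 s.2.2.2, "]"]

def parse_cores_alt (resources : List String) (textmax : Int) : String :=
  let items := PySem.List.sorted2 (resources.map (fun x =>
      (((PySem.Str.split? x ".").getD []).getD 0 "",
       (PySem.Int.ofStr? (((PySem.Str.split? x "/").getD []).getD 1 "")).getD 0)))
      (fun i => i.1) (fun i => i.2) false
  let s := items.foldl pvStep ([], none, 0, 0)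
  let ret := PySem.Str.join "" (pvFinish s)
  if PySem.Str.len ret > textmax then PySem.Str.slice ret none (some (textmax - 3)) ++ "..." else ret

-- ===== PRECONDITION & SPEC =====
-- Pre_ excludes exactly the inputs where the Python A raises: a resource without '/'
-- (IndexError on x.split("/")[1]) or whose part after the first '/' is not int()-parsable
-- (ValueError).
def Pre_parse_cores (resources : List String) (textmax : Int) : Prop :=
  ∀ x ∈ resources,
    2 ≤ ((PySem.Str.split? x "/").getD []).length ∧
    (PySem.Int.ofStr? (((PySem.Str.split? x "/").getD []).getD 1 "")).isSome
instance (resources : List String) (textmax : Int) : Decidable (Pre_parse_cores resources textmax) := by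
  unfold Pre_parse_cores; infer_instance

def pvWitness_parse_cores : List String × Int := (["node-1.grid.fr/3", "node-1.grid.fr/4", "m.grid.fr/7"], 50)

def Spec_parse_cores (resources : List String) (textmax : Int) (out : String) : Prop := out = parse_cores_alt resources textmax
instance (resources : List String) (textmax : Int) (out : String) : Decidable (Spec_parse_cores resources textmax out) := by unfold Spec_parse_cores; infer_instance

-- ===== CLAIM (what is proved, stated in full; the proofs are below) =====
def Claim_equal_parse_cores : Prop := ∀ (resources : List String) (textmax : Int), Dom_parse_cores resources textmax → Pre_parse_cores resources textmax → Spec_parse_cores resources textmax (parse_cores resources textmax)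

-- ===== LEMMAS AND PROOFS =====

-- ---------- generic string plumbing ----------
theorem pv_str_ext {a b : String} (h : a.toList = b.toList) : a = b :=
  String.toList_inj.mp h

theorem pv_join_cons_cons (x y : String) (t : List String) :
    PySem.Str.join "," (x :: y :: t) = x ++ "," ++ PySem.Str.join "," (y :: t) := by
  apply pv_str_ext
  simp [PySem.Str.toList_join, PySem.Chars.join_cons_cons]

theorem pv_join_singleton (x : String) : PySem.Str.join "," [x] = x := by
  apply pv_str_ext
  simp [PySem.Str.toList_join, PySem.Chars.join_singleton]

theorem pv_join0_singleton (x : String) : PySem.Str.join "" [x] = x := by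
  apply pv_str_ext
  simp [PySem.Str.toList_join, PySem.Chars.join_singleton]

theorem pv_join0_nil : PySem.Str.join "" ([] : List String) = "" := by
  apply pv_str_ext
  simp [PySem.Str.toList_join, PySem.Chars.join, List.intercalate]

theorem pv_join0_cons (x : String) (t : List String) :
    PySem.Str.join "" (x :: t) = x ++ PySem.Str.join "" t := by
  cases t with
  | nil =>
    rw [pv_join0_singleton, pv_join0_nil]
    exact pv_str_ext (by simp)
  | cons y t =>
    apply pv_str_ext
    simp [PySem.Str.toList_join, PySem.Chars.join_cons_cons]

theorem pv_join0_append (a b : List String) :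
    PySem.Str.join "" (a ++ b) = PySem.Str.join "" a ++ PySem.Str.join "" b := by
  induction a with
  | nil => rw [List.nil_append, pv_join0_nil]; exact pv_str_ext (by simp)
  | cons x t IH =>
    rw [List.cons_append, pv_join0_cons, pv_join0_cons, IH, String.append_assoc]

-- join ", " (x :: l) as x followed by ", "-prefixed chunks
theorem pv_joinsep_cons (x : String) (l : List String) :
    PySem.Str.join ", " (x :: l) = x ++ PySem.Str.join "" (l.map (fun c => ", " ++ c)) := by
  induction l generalizing x with
  | nil =>
    rw [List.map_nil, pv_join0_nil]
    apply pv_str_ext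
    simp [PySem.Str.toList_join, PySem.Chars.join_singleton]
  | cons y t IH =>
    have h1 : PySem.Str.join ", " (x :: y :: t) = x ++ ", " ++ PySem.Str.join ", " (y :: t) := by
      apply pv_str_ext
      simp [PySem.Str.toList_join, PySem.Chars.join_cons_cons]
    rw [h1, IH y, List.map_cons, pv_join0_cons, String.append_assoc, String.append_assoc]

-- ---------- A's duplicated "start[-final]," fragment and its loop ----------
def pvFmtA (start fin : Int) : String :=
  if fin = start then PySem.Int.toStr start ++ ","
  else PySem.Int.toStr start ++ "-" ++ PySem.Int.toStr fin ++ ","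

def pvEmit : Int → Int → List Int → String
  | start, past, [] => pvFmtA start past
  | start, past, i :: rest =>
    if i ≠ past + 1 then pvFmtA start past ++ pvEmit i i rest else pvEmit start i rest

-- B's per-host emission (no trailing comma)
def pvEmitB : Int → Int → List Int → String
  | start, past, [] => pvClose start past
  | start, past, i :: rest =>
    if i ≠ past + 1 then pvClose start past ++ "," ++ pvEmitB i i rest else pvEmitB start i rest

-- runs of consecutive integers
def pvRuns : List Int → List (List Int)
  | [] => []
  | [c] => [[c]]
  | c :: b :: t =>
    match pvRuns (b :: t) with
    | r :: rs => if b = c + 1 then (c :: r) :: rs else [c] :: r :: rs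
    | [] => [[c]]

def pvFmtRun (vals : List Int) : String :=
  if vals.length = 1 then PySem.Int.toStr (vals.headD 0)
  else PySem.Int.toStr (vals.headD 0) ++ "-" ++ PySem.Int.toStr (vals.getLastD 0)

-- the canonical consecutive segment h, h+1, …, l
def pvSeg (h l : Int) : List Int := PySem.List.pyRange h (l + 1) 1

-- pvRuns with an open (already accumulated) segment in front
def pvRunsPre (seg : List Int) (rest : List Int) : List (List Int) :=
  match pvRuns rest, rest with
  | r :: rs, b :: _ => if b = seg.getLastD 0 + 1 then (seg ++ r) :: rs else seg :: r :: rs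
  | _, _ => [seg]

theorem pvRuns_ne_nil (c : Int) (rest : List Int) : pvRuns (c :: rest) ≠ [] := by
  cases rest with
  | nil => simp [pvRuns]
  | cons b t =>
    rw [pvRuns]
    rcases pvRuns (b :: t) with _ | ⟨r, rs⟩
    · simp
    · split
      · split <;> simp
      · simp

theorem pvRuns_nil : pvRuns [] = [] := by simp [pvRuns]

theorem pvRuns_single (c : Int) : pvRuns [c] = [[c]] := by simp [pvRuns]

theorem pvRuns_eq (c b : Int) (t r : List Int) (rs : List (List Int))
    (h2 : pvRuns (b :: t) = r :: rs) :
    pvRuns (c :: b :: t) = if b = c + 1 then (c :: r) :: rs else [c] :: r :: rs := by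
  rw [pvRuns, h2]

theorem pvRunsPre_nil (seg : List Int) : pvRunsPre seg [] = [seg] := by
  simp [pvRunsPre, pvRuns_nil]

theorem pvRunsPre_eq (seg : List Int) (b : Int) (t r : List Int) (rs : List (List Int))
    (h2 : pvRuns (b :: t) = r :: rs) :
    pvRunsPre seg (b :: t) = if b = seg.getLastD 0 + 1 then (seg ++ r) :: rs else seg :: r :: rs := by
  unfold pvRunsPre
  rw [h2]

theorem pvRuns_cons (c : Int) (rest : List Int) : pvRuns (c :: rest) = pvRunsPre [c] rest := by
  cases rest with
  | nil => rw [pvRuns_single, pvRunsPre_nil]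
  | cons b t =>
    obtain ⟨r, rs, hr⟩ : ∃ r rs, pvRuns (b :: t) = r :: rs := by
      rcases hx : pvRuns (b :: t) with _ | ⟨a, bb⟩
      · exact absurd hx (pvRuns_ne_nil _ _)
      · exact ⟨_, _, rfl⟩
    rw [pvRuns_eq c b t r rs hr, pvRunsPre_eq [c] b t r rs hr]
    simp

theorem pvRunsPre_push (seg : List Int) (l b : Int) (rest : List Int)
    (hlast : seg.getLastD 0 = l) (hb : b = l + 1) :
    pvRunsPre seg (b :: rest) = pvRunsPre (seg ++ [b]) rest := by
  subst hb
  cases rest with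
  | nil =>
    rw [pvRunsPre_eq seg (l + 1) [] [l + 1] [] (pvRuns_single _), pvRunsPre_nil, hlast,
      if_pos rfl]
  | cons d t =>
    obtain ⟨r2, rs2, h2⟩ : ∃ r2 rs2, pvRuns (d :: t) = r2 :: rs2 := by
      rcases hx : pvRuns (d :: t) with _ | ⟨a, b⟩
      · exact absurd hx (pvRuns_ne_nil _ _)
      · exact ⟨_, _, rfl⟩
    have hlast2 : (seg ++ [l + 1]).getLastD 0 = l + 1 := by simp
    by_cases hd : d = l + 1 + 1
    · have hr : pvRuns ((l + 1) :: d :: t) = ((l + 1) :: r2) :: rs2 := by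
        rw [pvRuns_eq _ _ _ _ _ h2, if_pos hd]
      rw [pvRunsPre_eq seg (l + 1) (d :: t) _ _ hr, hlast, if_pos rfl,
        pvRunsPre_eq (seg ++ [l + 1]) d t _ _ h2, hlast2, if_pos hd]
      simp
    · have hr : pvRuns ((l + 1) :: d :: t) = [l + 1] :: r2 :: rs2 := by
        rw [pvRuns_eq _ _ _ _ _ h2, if_neg hd]
      rw [pvRunsPre_eq seg (l + 1) (d :: t) _ _ hr, hlast, if_pos rfl,
        pvRunsPre_eq (seg ++ [l + 1]) d t _ _ h2, hlast2, if_neg hd]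

theorem pvSeg_self (h : Int) : pvSeg h h = [h] :=
  PySem.List.pyRange_one_singleton h

theorem pvSeg_last (h l : Int) (hle : h ≤ l) : (pvSeg h l).getLastD 0 = l := by
  unfold pvSeg
  rw [PySem.List.pyRange_one_succ_right hle]
  simp

theorem pvSeg_push (h l : Int) (hle : h ≤ l) : pvSeg h l ++ [l + 1] = pvSeg h (l + 1) := by
  unfold pvSeg
  rw [PySem.List.pyRange_one_succ_right (show h ≤ l + 1 by omega)]

theorem pvFmtRun_seg_close (h l : Int) (hle : h ≤ l) :
    pvFmtRun (pvSeg h l) = pvClose h l := by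
  have hlen : (pvSeg h l).length = (l + 1 - h).toNat := by
    unfold pvSeg; exact PySem.List.length_pyRange_one ..
  have hhead : (pvSeg h l).headD 0 = h := by
    unfold pvSeg; rw [PySem.List.pyRange_one_cons (show h < l + 1 by omega)]; rfl
  have hlast := pvSeg_last h l hle
  unfold pvFmtRun pvClose
  rw [hlen, hhead, hlast]
  by_cases he : l = h
  · rw [if_pos (by omega), if_pos he]
  · rw [if_neg (by omega), if_neg he]

theorem pvFmtRun_seg (h l : Int) (hle : h ≤ l) :
    pvFmtRun (pvSeg h l) ++ "," = pvFmtA h l := by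
  rw [pvFmtRun_seg_close h l hle]
  unfold pvClose pvFmtA
  by_cases he : l = h
  · rw [if_pos he, if_pos he]
  · rw [if_neg he, if_neg he, String.append_assoc, String.append_assoc]

-- A's emitter equals B's run formatting, with the open run (h..l) in front.
theorem pvEmit_eq_runs (rest : List Int) : ∀ (h l : Int), h ≤ l →
    pvEmit h l rest = PySem.Str.join "," ((pvRunsPre (pvSeg h l) rest).map pvFmtRun) ++ "," := by
  induction rest with
  | nil =>
    intro h l hle
    rw [pvEmit, pvRunsPre_nil, List.map_cons, List.map_nil, pv_join_singleton,
      pvFmtRun_seg h l hle]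
  | cons i rest' IH =>
    intro h l hle
    by_cases hi : i = l + 1
    · subst hi
      rw [pvEmit, if_neg (by omega), IH h (l + 1) (by omega),
        pvRunsPre_push (pvSeg h l) l (l + 1) rest' (pvSeg_last h l hle) rfl,
        pvSeg_push h l hle]
    · obtain ⟨r, rs, hr⟩ : ∃ r rs, pvRuns (i :: rest') = r :: rs := by
        rcases hx : pvRuns (i :: rest') with _ | ⟨a, b⟩
        · exact absurd hx (pvRuns_ne_nil _ _)
        · exact ⟨_, _, rfl⟩
      rw [pvEmit, if_pos hi, IH i i le_rfl, pvSeg_self,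
        show pvRunsPre [i] rest' = r :: rs from (pvRuns_cons i rest') ▸ hr,
        pvRunsPre_eq (pvSeg h l) i rest' r rs hr, pvSeg_last h l hle, if_neg hi]
      simp only [List.map_cons]
      rw [pv_join_cons_cons, ← pvFmtRun_seg h l hle, pvFmtRun_seg_close h l hle]
      simp [String.append_assoc]

-- B's emitter equals B's run formatting too (no trailing comma)
theorem pvEmitB_eq_runs (rest : List Int) : ∀ (h l : Int), h ≤ l →
    pvEmitB h l rest = PySem.Str.join "," ((pvRunsPre (pvSeg h l) rest).map pvFmtRun) := by
  induction rest with
  | nil =>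
    intro h l hle
    rw [pvEmitB, pvRunsPre_nil, List.map_cons, List.map_nil, pv_join_singleton,
      pvFmtRun_seg_close h l hle]
  | cons i rest' IH =>
    intro h l hle
    by_cases hi : i = l + 1
    · subst hi
      rw [pvEmitB, if_neg (by omega), IH h (l + 1) (by omega),
        pvRunsPre_push (pvSeg h l) l (l + 1) rest' (pvSeg_last h l hle) rfl,
        pvSeg_push h l hle]
    · obtain ⟨r, rs, hr⟩ : ∃ r rs, pvRuns (i :: rest') = r :: rs := by
        rcases hx : pvRuns (i :: rest') with _ | ⟨a, b⟩
        · exact absurd hx (pvRuns_ne_nil _ _)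
        · exact ⟨_, _, rfl⟩
      rw [pvEmitB, if_pos hi, IH i i le_rfl, pvSeg_self,
        show pvRunsPre [i] rest' = r :: rs from (pvRuns_cons i rest') ▸ hr,
        pvRunsPre_eq (pvSeg h l) i rest' r rs hr, pvSeg_last h l hle, if_neg hi]
      simp only [List.map_cons]
      rw [pv_join_cons_cons, pvFmtRun_seg_close h l hle]

-- A's foldl state machine plus the final append is pvEmit.
theorem pvLoopA_eq_emit (rest : List Int) : ∀ (start past : Int) (acc : String),
    (let st := rest.foldl
        (fun (sp : Int × Int × String) i =>
          if i ≠ sp.2.1 + 1 then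
            (i, i,
              if sp.2.1 = sp.1 then sp.2.2 ++ (PySem.Int.toStr sp.1 ++ ",")
              else sp.2.2 ++ (PySem.Int.toStr sp.1 ++ "-" ++ PySem.Int.toStr sp.2.1 ++ ","))
          else (sp.1, i, sp.2.2)) (start, past, acc)
     if rest.getLastD past = st.1 then st.2.2 ++ (PySem.Int.toStr st.1 ++ ",")
     else st.2.2 ++ (PySem.Int.toStr st.1 ++ "-" ++ PySem.Int.toStr (rest.getLastD past) ++ ","))
    = acc ++ pvEmit start past rest := by
  induction rest with
  | nil =>
    intro start past acc
    simp only [List.foldl_nil, List.getLastD_nil]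
    rw [pvEmit, pvFmtA]
    split_ifs <;> rfl
  | cons i rest' IH =>
    intro start past acc
    simp only [List.foldl_cons, List.getLastD_cons]
    by_cases hi : i = past + 1
    · rw [show (if i ≠ past + 1 then
          ((i, i,
            if past = start then acc ++ (PySem.Int.toStr start ++ ",")
            else acc ++ (PySem.Int.toStr start ++ "-" ++ PySem.Int.toStr past ++ ",")) : Int × Int × String)
          else (start, i, acc)) = (start, i, acc) from if_neg (by omega)]
      rw [IH start i acc, pvEmit, if_neg (by omega)]
    · rw [show (if i ≠ past + 1 then
          ((i, i,
            if past = start then acc ++ (PySem.Int.toStr start ++ ",")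
            else acc ++ (PySem.Int.toStr start ++ "-" ++ PySem.Int.toStr past ++ ",")) : Int × Int × String)
          else (start, i, acc)) = (i, i, acc ++ pvFmtA start past) from by
        rw [if_pos (by omega)]
        unfold pvFmtA
        split_ifs <;> rfl]
      rw [IH i i (acc ++ pvFmtA start past), pvEmit, if_pos (by omega), String.append_assoc]

theorem pv_slice_drop_comma (t : String) :
    PySem.Str.slice (t ++ ",") none (some (PySem.Str.len (t ++ ",") - 1)) = t := by
  apply pv_str_ext
  have h1 : PySem.Str.len (t ++ ",") - 1 = (t.toList.length : Int) := by
    simp [PySem.Str.len_eq, String.toList_append]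
  rw [h1]
  simp only [PySem.Str.toList_slice, PySem.Chars.slice_eq_listSlice,
    PySem.List.slice_to_natCast, String.toList_append]
  simp

theorem pv_getLast_cons (c : Int) (rest : List Int) :
    PySem.List.pyGetD (c :: rest) (-1) 0 = rest.getLastD c := by
  rw [PySem.List.pyGetD_neg_one _ _ (List.cons_ne_nil c rest)]
  have h2 : some ((c :: rest).getLast (List.cons_ne_nil c rest)) = some (rest.getLastD c) := by
    rw [← List.getLast?_eq_some_getLast, List.getLast?_cons, List.getLastD_eq_getLast?]
  exact Option.some.inj h2

-- the per-host chunk of the final string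
def pvChunk (k : String) (cores : List Int) : String :=
  k ++ "[" ++ PySem.Str.join "," ((pvRuns cores).map pvFmtRun) ++ "]"

-- A's per-host body equals pvChunk of the sorted cores, for nonempty v
theorem pv_inner_eq (k : String) (v : List String) (hv : v ≠ []) :
    (let cores := PySem.List.sorted (v.map (fun s => (PySem.Int.ofStr? s).getD 0)) (fun x => x) false
     let start := PySem.List.pyGetD cores 0 0
     let st := (PySem.List.slice cores (some 1) none).foldl
         (fun (sp : Int × Int × String) i =>
           if i ≠ sp.2.1 + 1 then
             (i, i,
               if sp.2.1 = sp.1 then sp.2.2 ++ (PySem.Int.toStr sp.1 ++ ",")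
               else sp.2.2 ++ (PySem.Int.toStr sp.1 ++ "-" ++ PySem.Int.toStr sp.2.1 ++ ","))
           else (sp.1, i, sp.2.2))
         (start, start, "")
     let fin := PySem.List.pyGetD cores (-1) 0
     let final_string :=
       if fin = st.1 then st.2.2 ++ (PySem.Int.toStr st.1 ++ ",")
       else st.2.2 ++ (PySem.Int.toStr st.1 ++ "-" ++ PySem.Int.toStr fin ++ ",")
     k ++ "[" ++ PySem.Str.slice final_string none (some (PySem.Str.len final_string - 1)) ++ "]")
    = pvChunk k (PySem.List.sorted (v.map (fun s => (PySem.Int.ofStr? s).getD 0)) (fun x => x) false) := by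
  dsimp only
  obtain ⟨c, rest, hcr⟩ : ∃ c rest,
      PySem.List.sorted (v.map fun s => (PySem.Int.ofStr? s).getD 0) (fun x => x) false = c :: rest := by
    rcases h : PySem.List.sorted (v.map fun s => (PySem.Int.ofStr? s).getD 0) (fun x => x) false with _ | ⟨c, r⟩
    · exact absurd (List.map_eq_nil_iff.mp ((PySem.List.sorted_eq_nil_iff _ _ _).mp h)) hv
    · exact ⟨_, _, rfl⟩
  rw [hcr]
  unfold pvChunk
  rw [PySem.List.pyGetD_zero_cons, PySem.List.slice_from_one, List.tail_cons,
    pv_getLast_cons, pvLoopA_eq_emit rest c c "", String.empty_append,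
    pvEmit_eq_runs rest c c le_rfl, pvSeg_self,
    show pvRunsPre [c] rest = pvRuns (c :: rest) from (pvRuns_cons c rest).symm,
    pv_slice_drop_comma]

-- ---------- sorted2: ordering and uniqueness ----------
def pvLex {β : Type} [LinearOrder β] (a b : String × β) : Prop :=
  a.1 < b.1 ∨ (a.1 = b.1 ∧ a.2 ≤ b.2)

theorem pvLex_trans {β : Type} [LinearOrder β] : Transitive (@pvLex β _) := by
  intro a b c hab hbc
  rcases hab with h1 | ⟨h1, h1'⟩ <;> rcases hbc with h2 | ⟨h2, h2'⟩
  · exact Or.inl (lt_trans h1 h2)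
  · exact Or.inl (h2 ▸ h1)
  · exact Or.inl (h1 ▸ h2)
  · exact Or.inr ⟨h1.trans h2, le_trans h1' h2'⟩

theorem pv_insertBy_pairwise {α : Type} (r : α → α → Prop) (htrans : Transitive r)
    (before : α → α → Bool)
    (ht : ∀ a b, before a b = true → r a b) (hf : ∀ a b, before a b = false → r b a)
    (x : α) (ys : List α) (h : ys.Pairwise r) :
    (PySem.List.insertBy before x ys).Pairwise r := by
  induction ys with
  | nil => simp [PySem.List.insertBy]
  | cons y ys IH =>
    rw [PySem.List.insertBy]
    rcases List.pairwise_cons.mp h with ⟨hy, hys⟩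
    by_cases hb : before x y = true
    · rw [if_pos hb]
      refine List.pairwise_cons.mpr ⟨?_, h⟩
      intro z hz
      rcases List.mem_cons.mp hz with rfl | hz'
      · exact ht _ _ hb
      · exact htrans (ht _ _ hb) (hy z hz')
    · rw [if_neg hb]
      refine List.pairwise_cons.mpr ⟨?_, IH hys⟩
      intro z hz
      by_cases hzx : z = x
      · exact hzx ▸ hf _ _ (by revert hb; cases before x y <;> simp)
      · have : z ∈ ys := by
          have hm := PySem.List.mem_insertBy (before := before) (x := x) (ys := ys) (y := z)
          rcases hm.mp hz with h' | h'
          · exact absurd h' hzx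
          · exact h'
        exact hy z this

theorem pv_foldl_insertBy_pairwise {α : Type} (r : α → α → Prop) (htrans : Transitive r)
    (before : α → α → Bool)
    (ht : ∀ a b, before a b = true → r a b) (hf : ∀ a b, before a b = false → r b a)
    (xs : List α) : ∀ (acc : List α), acc.Pairwise r →
    (xs.foldl (fun acc x => PySem.List.insertBy before x acc) acc).Pairwise r := by
  induction xs with
  | nil => intro acc h; exact h
  | cons x xs IH =>
    intro acc h
    exact IH _ (pv_insertBy_pairwise r htrans before ht hf x acc h)

theorem pv_sorted2_pairwise {β : Type} [LinearOrder β] (xs : List (String × β)) :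
    (PySem.List.sorted2 xs Prod.fst Prod.snd false).Pairwise pvLex := by
  unfold PySem.List.sorted2
  simp only [if_neg (by simp : ¬ (false = true))]
  apply pv_foldl_insertBy_pairwise pvLex pvLex_trans
  · intro a b hb
    simp only [Bool.or_eq_true, Bool.and_eq_true, decide_eq_true_eq, Bool.not_eq_eq_eq_not,
      Bool.not_true, decide_eq_false_iff_not] at hb
    rcases hb with h | ⟨h1, h2⟩
    · exact Or.inl h
    · rcases lt_trichotomy a.1 b.1 with h' | h' | h'
      · exact Or.inl h'
      · exact Or.inr ⟨h', le_of_lt h2⟩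
      · exact absurd h' h1
  · intro a b hb
    simp only [Bool.or_eq_false_iff, Bool.and_eq_false_iff, decide_eq_false_iff_not,
      Bool.not_eq_eq_eq_not, Bool.not_false, decide_eq_true_eq] at hb
    rcases hb with ⟨h1, h2 | h2⟩
    · exact Or.inl h2
    · rcases lt_trichotomy b.1 a.1 with h' | h' | h'
      · exact Or.inl h'
      · exact Or.inr ⟨h', not_lt.mp h2⟩
      · exact absurd h' h1
  · exact List.Pairwise.nil

theorem pvLex_antisymm {β : Type} [LinearOrder β] (a b : String × β)
    (h1 : pvLex a b) (h2 : pvLex b a) : a = b := by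
  rcases h1 with h1 | ⟨h1, h1'⟩ <;> rcases h2 with h2 | ⟨h2, h2'⟩
  · exact absurd h2 (lt_asymm h1)
  · exact absurd h1 (h2 ▸ lt_irrefl _)
  · exact absurd h2 (h1 ▸ lt_irrefl _)
  · exact Prod.ext h1 (le_antisymm h1' h2')

theorem pv_sorted2_eq {β : Type} [LinearOrder β] (xs ys : List (String × β))
    (hperm : ys.Perm xs) (hp : ys.Pairwise pvLex) :
    PySem.List.sorted2 xs Prod.fst Prod.snd false = ys := by
  refine List.eq_of_perm_of_sorted (fun a b _ _ h1 h2 => pvLex_antisymm a b h1 h2)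
    (pv_sorted2_pairwise xs) hp ?_
  exact (PySem.List.sorted2_perm xs Prod.fst Prod.snd false).trans hperm.symm

-- ---------- Set.ofList of a nondecreasing list is strictly increasing ----------
theorem pv_foldl_add_sublist {α : Type} [BEq α] (xs : List α) :
    ∀ (acc ys : List α), acc.Sublist ys →
    (xs.foldl PySem.Set.add acc).Sublist (ys ++ xs) := by
  induction xs with
  | nil => intro acc ys h; simpa using h
  | cons x xs IH =>
    intro acc ys h
    rw [List.foldl_cons]
    have h2 : (PySem.Set.add acc x).Sublist (ys ++ [x]) := by
      unfold PySem.Set.add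
      split
      · exact h.trans (List.sublist_append_left ys [x])
      · exact h.append_right [x] |>.trans (by simp)
    have := IH (PySem.Set.add acc x) (ys ++ [x]) h2
    simpa using this

theorem pv_ofList_sublist {α : Type} [BEq α] (xs : List α) :
    (PySem.Set.ofList xs).Sublist xs := by
  rw [PySem.Set.ofList_eq_foldl]
  have := pv_foldl_add_sublist xs [] [] (List.Sublist.refl [])
  simpa using this

theorem pv_ofList_pairwise_lt {α : Type} [BEq α] [LawfulBEq α] [LinearOrder α] (xs : List α)
    (h : xs.Pairwise (· ≤ ·)) : (PySem.Set.ofList xs).Pairwise (· < ·) := by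
  have hle : (PySem.Set.ofList xs).Pairwise (· ≤ ·) := h.sublist (pv_ofList_sublist xs)
  have hnd : (PySem.Set.ofList xs).Pairwise (· ≠ ·) := PySem.Set.nodup_ofList xs
  exact (hle.and hnd).imp (fun h => lt_of_le_of_ne h.1 h.2)

-- ---------- grouping a pair list by its keys ----------
theorem pv_flatMap_congr_perm {α β : Type} (ks : List α) (f g : α → List β)
    (h : ∀ k ∈ ks, (f k).Perm (g k)) : (ks.flatMap f).Perm (ks.flatMap g) := by
  induction ks with
  | nil => simp
  | cons k ks IH =>
    simp only [List.flatMap_cons]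
    exact (h k (List.mem_cons_self)).append (IH (fun k hk => h k (List.mem_cons_of_mem _ hk)))

theorem pv_count_filter_key (l : List (String × Int)) (j : String) (c : Int) (k : String) :
    List.count (j, c) (l.filter (fun p => p.1 == k)) =
      if j = k then List.count (j, c) l else 0 := by
  by_cases hjk : j = k
  · rw [if_pos hjk]
    exact List.count_filter (by simp [hjk])
  · rw [if_neg hjk]
    refine List.count_eq_zero.mpr ?_
    intro hmem
    have := List.of_mem_filter hmem
    simp at this
    exact hjk this

theorem pv_sum_if_mem (ks : List String) (j : String) (n : Nat) :
    ks.Nodup → (j ∈ ks → (ks.map (fun k => if j = k then n else 0)).sum = n) ∧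
      (j ∉ ks → (ks.map (fun k => if j = k then n else 0)).sum = 0) := by
  induction ks with
  | nil => intro _; exact ⟨fun h => absurd h (List.not_mem_nil), fun _ => rfl⟩
  | cons k ks IH =>
    intro hnd
    rcases List.nodup_cons.mp hnd with ⟨hk, hnd'⟩
    rcases IH hnd' with ⟨IH1, IH2⟩
    constructor
    · intro hj
      simp only [List.map_cons, List.sum_cons]
      rcases List.mem_cons.mp hj with rfl | hj'
      · rw [if_pos rfl, IH2 hk]
        omega
      · rw [if_neg (by rintro rfl; exact hk hj'), IH1 hj']
        omega
    · intro hj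
      simp only [List.map_cons, List.sum_cons]
      rw [if_neg (by rintro rfl; exact hj List.mem_cons_self),
        IH2 (fun h => hj (List.mem_cons_of_mem _ h))]

theorem pv_flat_filter_perm (l : List (String × Int)) (ks : List String) (hnd : ks.Nodup)
    (hcov : ∀ p ∈ l, p.1 ∈ ks) :
    (ks.flatMap (fun k => l.filter (fun p => p.1 == k))).Perm l := by
  refine List.perm_iff_count.mpr ?_
  rintro ⟨j, c⟩
  rw [List.flatMap_def, List.count_flatten, List.map_map]
  have hmap : (ks.map (List.count (j, c) ∘ fun k => l.filter (fun p => p.1 == k)))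
      = ks.map (fun k => if j = k then List.count (j, c) l else 0) := by
    exact List.map_congr_left (fun k _ => pv_count_filter_key l j c k)
  rw [hmap]
  by_cases hj : j ∈ ks
  · exact (pv_sum_if_mem ks j _ hnd).1 hj
  · rw [(pv_sum_if_mem ks j _ hnd).2 hj]
    refine (List.count_eq_zero.mpr ?_).symm
    intro hmem
    exact hj (hcov _ hmem)

theorem pv_filter_eq_map_snd (l : List (String × Int)) (k : String) :
    l.filter (fun p => p.1 == k) =
      ((l.filter (fun p => p.1 == k)).map Prod.snd).map (fun c => (k, c)) := by
  rw [List.map_map]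
  refine ((List.map_id _).symm).trans (List.map_congr_left ?_)
  intro p hp
  have := List.of_mem_filter hp
  simp at this
  simp [Function.comp, ← this]

-- ---------- names for the intermediate data both reductions meet at ----------
def pvPairsA (rs : List String) : List (String × String) :=
  PySem.List.sorted2 (rs.map (fun x =>
      (((PySem.Str.split? x ".").getD []).getD 0 "",
       ((PySem.Str.split? x "/").getD []).getD 1 ""))) Prod.fst Prod.snd false

def pvKeys (l : List (String × String)) : List String :=
  PySem.Set.ofList (l.map (fun i => i.1))

def pvCores (l : List (String × String)) (k : String) : List Int :=
  PySem.List.sorted ((l.filter (fun p => p.1 == k)).map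
    (fun p => (PySem.Int.ofStr? p.2).getD 0)) (fun x => x) false

theorem pv_chars_join0 (l : List (List Char)) : PySem.Chars.join [] l = l.flatten := by
  induction l with
  | nil => simp [PySem.Chars.join, List.intercalate]
  | cons x t IH =>
    cases t with
    | nil => simp [PySem.Chars.join, List.intercalate]
    | cons y s => rw [PySem.Chars.join_cons_cons, IH]; simp

-- ---------- B's single pass over one host's remaining cores ----------
theorem pv_step_block (cs : List Int) : ∀ (buf : List String) (k : String) (r p : Int),
    ∃ T r' p', (cs.map (fun c => (k, c))).foldl pvStep (buf, some k, r, p) = (buf ++ T, some k, r', p')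
      ∧ PySem.Str.join "" T ++ pvClose r' p' = pvEmitB r p cs := by
  induction cs with
  | nil =>
    intro buf k r p
    exact ⟨[], r, p, by simp, by rw [pv_join0_nil, pvEmitB]; exact pv_str_ext (by simp)⟩
  | cons c cs IH =>
    intro buf k r p
    rw [List.map_cons, List.foldl_cons]
    by_cases hc : c = p + 1
    · have hstep : pvStep (buf, some k, r, p) (k, c) = (buf, some k, r, c) := by
        unfold pvStep
        dsimp only
        rw [if_neg (by simp), if_neg (by omega)]
      rw [hstep]
      obtain ⟨T, r', p', heq, hjoin⟩ := IH buf k r c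
      exact ⟨T, r', p', heq, by rw [hjoin, pvEmitB, if_neg (by omega)]⟩
    · have hstep : pvStep (buf, some k, r, p) (k, c) =
          (buf ++ [pvClose r p, ","], some k, c, c) := by
        unfold pvStep
        dsimp only
        rw [if_neg (by simp), if_pos (by omega)]
      rw [hstep]
      obtain ⟨T, r', p', heq, hjoin⟩ := IH (buf ++ [pvClose r p, ","]) k c c
      refine ⟨[pvClose r p, ","] ++ T, r', p', by rw [heq, List.append_assoc], ?_⟩
      rw [pv_join0_append, pv_join0_cons, pv_join0_singleton, String.append_assoc,
        String.append_assoc, hjoin, pvEmitB, if_pos (by omega), String.append_assoc]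

-- ---------- B's pass over the remaining host blocks, then the epilogue ----------
theorem pv_step_keys (G : String → List Int) (ks : List String) :
    ∀ (k0 : String) (buf : List String) (r p : Int),
    (k0 :: ks).Pairwise (fun a b => a ≠ b) → (∀ k ∈ ks, G k ≠ []) →
    PySem.Str.join "" (pvFinish ((ks.flatMap (fun k => (G k).map (fun c => (k, c)))).foldl
        pvStep (buf, some k0, r, p)))
    = PySem.Str.join "" buf ++ pvClose r p ++ "]" ++
      PySem.Str.join "" (ks.map (fun k => ", " ++ pvChunk k (G k))) := by
  induction ks with
  | nil =>
    intro k0 buf r p _ _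
    rw [List.flatMap_nil, List.foldl_nil]
    unfold pvFinish
    apply pv_str_ext
    simp [pv_chars_join0, String.toList_append]
  | cons k1 ks' IH =>
    intro k0 buf r p hpw hne
    obtain ⟨c0, cs, hG⟩ : ∃ c0 cs, G k1 = c0 :: cs := by
      rcases h : G k1 with _ | ⟨c0, cs⟩
      · exact absurd h (hne k1 List.mem_cons_self)
      · exact ⟨_, _, rfl⟩
    have hk01 : k0 ≠ k1 := (List.pairwise_cons.mp hpw).1 k1 List.mem_cons_self
    rw [List.flatMap_cons, hG, List.map_cons, List.foldl_append, List.foldl_cons]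
    have hstep : pvStep (buf, some k0, r, p) (k1, c0) =
        (buf ++ [pvClose r p, "], "] ++ [k1 ++ "["], some k1, c0, c0) := by
      unfold pvStep
      rw [if_pos (by simp [Ne.symm hk01])]
    rw [hstep]
    obtain ⟨T, r', p', heq, hjoin⟩ := pv_step_block cs (buf ++ [pvClose r p, "], "] ++ [k1 ++ "["]) k1 c0 c0
    rw [heq]
    rw [IH k1 _ r' p' (List.Pairwise.of_cons hpw) (fun k hk => hne k (List.mem_cons_of_mem _ hk))]
    have hchunk : pvChunk k1 (G k1) = k1 ++ "[" ++ (PySem.Str.join "" T ++ pvClose r' p') ++ "]" := by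
      rw [hjoin, hG, pvEmitB_eq_runs cs c0 c0 le_rfl, pvSeg_self]
      unfold pvChunk
      rw [pvRuns_cons]
    rw [List.map_cons, pv_join0_cons, hchunk]
    apply pv_str_ext
    simp [pv_chars_join0, String.toList_append]

-- ---------- the globally sorted (host, int core) pairs are the hosts' blocks in order ----------
theorem pv_cores_perm_int_filter (rs : List String) (k : String) :
    (pvCores (pvPairsA rs) k).Perm
      (((rs.map (fun x => (((PySem.Str.split? x ".").getD []).getD 0 "",
          (PySem.Int.ofStr? (((PySem.Str.split? x "/").getD []).getD 1 "")).getD 0))).filter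
        (fun p => p.1 == k)).map Prod.snd) := by
  have hAS := PySem.List.sorted2_perm (rs.map (fun x =>
      (((PySem.Str.split? x ".").getD []).getD 0 "",
       ((PySem.Str.split? x "/").getD []).getD 1 ""))) Prod.fst Prod.snd false
  have hAI : ((pvPairsA rs).map (fun p => (p.1, (PySem.Int.ofStr? p.2).getD 0))).Perm
      (rs.map (fun x => (((PySem.Str.split? x ".").getD []).getD 0 "",
          (PySem.Int.ofStr? (((PySem.Str.split? x "/").getD []).getD 1 "")).getD 0))) := by
    have := hAS.map (fun p : String × String => (p.1, (PySem.Int.ofStr? p.2).getD 0))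
    rw [List.map_map] at this
    exact this
  have h2 : ((pvPairsA rs).filter (fun p => p.1 == k)).map
      (fun p => (PySem.Int.ofStr? p.2).getD 0)
      = (((pvPairsA rs).map (fun p => (p.1, (PySem.Int.ofStr? p.2).getD 0))).filter
        (fun p => p.1 == k)).map Prod.snd := by
    rw [List.filter_map, List.map_map]
    rfl
  have h1 : (pvCores (pvPairsA rs) k).Perm
      (((pvPairsA rs).filter (fun p => p.1 == k)).map (fun p => (PySem.Int.ofStr? p.2).getD 0)) :=
    PySem.List.sorted_perm _ _ _
  rw [h2] at h1
  exact h1.trans ((hAI.filter _).map Prod.snd)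

theorem pv_keysA_pairwise_lt (rs : List String) : (pvKeys (pvPairsA rs)).Pairwise (· < ·) := by
  apply pv_ofList_pairwise_lt
  have hp := pv_sorted2_pairwise (rs.map (fun x =>
      (((PySem.Str.split? x ".").getD []).getD 0 "",
       ((PySem.Str.split? x "/").getD []).getD 1 "")))
  exact List.pairwise_map.mpr (hp.imp (fun h => by
    rcases h with h | ⟨h, _⟩
    · exact le_of_lt h
    · exact le_of_eq h))

theorem pv_itemsB_eq (rs : List String) :
    PySem.List.sorted2 (rs.map (fun x =>
        (((PySem.Str.split? x ".").getD []).getD 0 "",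
         (PySem.Int.ofStr? (((PySem.Str.split? x "/").getD []).getD 1 "")).getD 0)))
      Prod.fst Prod.snd false
    = (pvKeys (pvPairsA rs)).flatMap (fun k => (pvCores (pvPairsA rs) k).map (fun c => (k, c))) := by
  apply pv_sorted2_eq
  · -- permutation
    have hb : ∀ k ∈ pvKeys (pvPairsA rs),
        ((pvCores (pvPairsA rs) k).map (fun c => (k, c))).Perm
        ((rs.map (fun x => (((PySem.Str.split? x ".").getD []).getD 0 "",
            (PySem.Int.ofStr? (((PySem.Str.split? x "/").getD []).getD 1 "")).getD 0))).filter
          (fun p => p.1 == k)) := by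
      intro k _
      have h1 := (pv_cores_perm_int_filter rs k).map (fun c => (k, c))
      have h2 := pv_filter_eq_map_snd (rs.map (fun x =>
          (((PySem.Str.split? x ".").getD []).getD 0 "",
           (PySem.Int.ofStr? (((PySem.Str.split? x "/").getD []).getD 1 "")).getD 0)))
        k
      rw [← h2] at h1
      exact h1
    refine (pv_flatMap_congr_perm _ _ _ hb).trans ?_
    apply pv_flat_filter_perm
    · exact (pv_keysA_pairwise_lt rs).imp ne_of_lt
    · intro p hp
      unfold pvKeys
      rw [PySem.Set.mem_ofList]
      have hAS := PySem.List.sorted2_perm (rs.map (fun x =>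
          (((PySem.Str.split? x ".").getD []).getD 0 "",
           ((PySem.Str.split? x "/").getD []).getD 1 ""))) Prod.fst Prod.snd false
      have hfst : ((pvPairsA rs).map (fun i => i.1)).Perm
          ((rs.map (fun x => (((PySem.Str.split? x ".").getD []).getD 0 "",
            (PySem.Int.ofStr? (((PySem.Str.split? x "/").getD []).getD 1 "")).getD 0))).map
            (fun i => i.1)) := by
        have := hAS.map (fun i : String × String => i.1)
        rw [List.map_map] at this
        rw [List.map_map]
        exact this
      exact hfst.mem_iff.mpr (List.mem_map_of_mem hp)
  · -- pairwise lex
    rw [List.flatMap_def]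
    refine List.pairwise_flatten.mpr ⟨?_, ?_⟩
    · intro l hl
      obtain ⟨k, _, rfl⟩ := List.mem_map.mp hl
      refine List.pairwise_map.mpr ?_
      have := PySem.List.sorted_pairwise
        (((pvPairsA rs).filter (fun p => p.1 == k)).map (fun p => (PySem.Int.ofStr? p.2).getD 0))
        (fun x => x)
      exact this.imp (fun h => Or.inr ⟨rfl, h⟩)
    · refine List.pairwise_map.mpr ?_
      refine (pv_keysA_pairwise_lt rs).imp ?_
      intro k1 k2 h x hx y hy
      obtain ⟨a, _, rfl⟩ := List.mem_map.mp hx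
      obtain ⟨b, _, rfl⟩ := List.mem_map.mp hy
      exact Or.inl h

theorem pv_cores_ne_nil (rs : List String) (k : String) (hk : k ∈ pvKeys (pvPairsA rs)) :
    pvCores (pvPairsA rs) k ≠ [] := by
  unfold pvKeys at hk
  rw [PySem.Set.mem_ofList] at hk
  obtain ⟨p, hp, hpk⟩ := List.mem_map.mp hk
  intro h
  unfold pvCores at h
  have := List.map_eq_nil_iff.mp ((PySem.List.sorted_eq_nil_iff _ _ _).mp h)
  have hmem : p ∈ (pvPairsA rs).filter (fun q => q.1 == k) :=
    List.mem_filter.mpr ⟨hp, by simp [hpk]⟩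
  rw [this] at hmem
  exact List.not_mem_nil hmem

def pvRetA (rs : List String) : String :=
  PySem.Str.join ", " ((pvKeys (pvPairsA rs)).map (fun k => pvChunk k (pvCores (pvPairsA rs) k)))

theorem pv_joinsep_nil : PySem.Str.join ", " ([] : List String) = "" := by
  apply pv_str_ext
  simp [PySem.Str.toList_join, PySem.Chars.join, List.intercalate]

-- every value of the grouping dict is nonempty
theorem pv_values_ne_nil (pairs : List (String × String)) (k : String)
    (hk : k ∈ pvKeys pairs) :
    ((pairs.filter (fun p => p.1 == k)).map (fun p => p.2)) ≠ [] := by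
  unfold pvKeys at hk
  rw [PySem.Set.mem_ofList] at hk
  obtain ⟨p, hp, hpk⟩ := List.mem_map.mp hk
  intro h
  have hmem : p ∈ pairs.filter (fun q => q.1 == k) :=
    List.mem_filter.mpr ⟨hp, by simp [hpk]⟩
  rw [List.map_eq_nil_iff.mp h] at hmem
  exact List.not_mem_nil hmem

-- ---------- A reduces to pvRetA ----------
theorem pv_A_eq (rs : List String) (tm : Int) :
    parse_cores rs tm =
      if PySem.Str.len (pvRetA rs) > tm
      then PySem.Str.slice (pvRetA rs) none (some (tm - 3)) ++ "..." else pvRetA rs := by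
  unfold parse_cores
  dsimp only
  rw [show PySem.List.sorted2 (rs.map (fun x =>
      (((PySem.Str.split? x ".").getD []).getD 0 "",
       ((PySem.Str.split? x "/").getD []).getD 1 "")))
      (fun i => i.1) (fun i => i.2) false = pvPairsA rs from rfl]
  rw [PySem.List.foldl_append_singleton_eq_map, List.nil_append]
  have hnd : ((pvPairsA rs).foldl (fun d i => d.modify i.1 [] (fun l => l ++ [i.2]))
      (PySem.Dict.empty : PySem.Dict String (List String))).keys.Nodup :=
    PySem.Dict.nodup_keys_foldl_modify_key (pvPairsA rs) (fun p => p.1) []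
      (fun _ p => fun l => l ++ [p.2]) PySem.Dict.empty (by simp [PySem.Dict.keys_empty])
  rw [PySem.Dict.items_eq_map_keys _ hnd [], List.map_map]
  have hkeys : ((pvPairsA rs).foldl (fun d i => d.modify i.1 [] (fun l => l ++ [i.2]))
      (PySem.Dict.empty : PySem.Dict String (List String))).keys = pvKeys (pvPairsA rs) := by
    have := PySem.Dict.keys_foldl_modify_key (pvPairsA rs) (fun p => p.1) []
      (fun _ p => fun l => l ++ [p.2]) PySem.Dict.empty
    rw [this, PySem.Dict.keys_empty, PySem.Set.update_nil_left]
    rfl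
  rw [hkeys]
  rw [List.map_congr_left (g := fun k => pvChunk k (pvCores (pvPairsA rs) k)) ?_]
  · rfl
  · intro k hk
    have hgetD : ((pvPairsA rs).foldl (fun d i => d.modify i.1 [] (fun l => l ++ [i.2]))
        (PySem.Dict.empty : PySem.Dict String (List String))).getD k []
        = ((pvPairsA rs).filter (fun p => p.1 == k)).map (fun p => p.2) := by
      rw [PySem.Dict.getD_foldl_modify_append, PySem.Dict.getD_empty, List.nil_append]
    have hv := pv_values_ne_nil (pvPairsA rs) k hk
    have h1 := pv_inner_eq k (((pvPairsA rs).foldl (fun d i => d.modify i.1 [] (fun l => l ++ [i.2]))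
        (PySem.Dict.empty : PySem.Dict String (List String))).getD k []) (by rw [hgetD]; exact hv)
    refine h1.trans ?_
    rw [hgetD, List.map_map]
    rfl

-- ---------- B reduces to pvRetA ----------
theorem pv_B_ret (rs : List String) :
    PySem.Str.join "" (pvFinish
      ((((pvKeys (pvPairsA rs)).flatMap (fun k => (pvCores (pvPairsA rs) k).map (fun c => (k, c)))).foldl
        pvStep ([], none, 0, 0)))) = pvRetA rs := by
  unfold pvRetA
  have hlt := pv_keysA_pairwise_lt rs
  have hne := pv_cores_ne_nil rs
  rcases hks : pvKeys (pvPairsA rs) with _ | ⟨k1, ks'⟩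
  · rw [List.flatMap_nil, List.foldl_nil]
    unfold pvFinish
    rw [List.map_nil, pv_joinsep_nil, pv_join0_nil]
  · rw [hks] at hlt
    obtain ⟨c0, cs, hG⟩ : ∃ c0 cs, pvCores (pvPairsA rs) k1 = c0 :: cs := by
      rcases h : pvCores (pvPairsA rs) k1 with _ | ⟨c0, cs⟩
      · exact absurd h (hne k1 (hks ▸ List.mem_cons_self))
      · exact ⟨_, _, rfl⟩
    rw [List.flatMap_cons, hG, List.map_cons, List.foldl_append, List.foldl_cons]
    have hstep : pvStep ([], none, 0, 0) (k1, c0) = ([k1 ++ "["], some k1, c0, c0) := by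
      unfold pvStep
      dsimp only
      rw [if_pos (by simp)]
      rfl
    rw [hstep]
    obtain ⟨T, r', p', heq, hjoin⟩ := pv_step_block cs [k1 ++ "["] k1 c0 c0
    rw [heq, pv_step_keys (pvCores (pvPairsA rs)) ks' k1 _ r' p'
      (hlt.imp ne_of_lt)
      (fun k hk => hne k (hks ▸ List.mem_cons_of_mem _ hk))]
    have hchunk : pvChunk k1 (pvCores (pvPairsA rs) k1)
        = k1 ++ "[" ++ (PySem.Str.join "" T ++ pvClose r' p') ++ "]" := by
      rw [hjoin, hG, pvEmitB_eq_runs cs c0 c0 le_rfl, pvSeg_self]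
      unfold pvChunk
      rw [pvRuns_cons]
    rw [List.map_cons, pv_joinsep_cons, hchunk]
    apply pv_str_ext
    simp [pv_chars_join0, String.toList_append]
    rfl

theorem pv_B_eq (rs : List String) (tm : Int) :
    parse_cores_alt rs tm =
      if PySem.Str.len (pvRetA rs) > tm
      then PySem.Str.slice (pvRetA rs) none (some (tm - 3)) ++ "..." else pvRetA rs := by
  unfold parse_cores_alt
  dsimp only
  rw [pv_itemsB_eq rs, pv_B_ret rs]

-- ===== VERDICT (by name: the statement is the Claim_ definition above) =====
theorem parse_cores_spec : Claim_equal_parse_cores := by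
  intro resources textmax _ _
  unfold Spec_parse_cores
  rw [pv_A_eq, pv_B_eq]
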